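-- pv_equiv track=rewrite | github.com/istojan/spellchecker-mk | spellchecker/core_logic.py | extract_min_max_frequency_values
-- ===== SOURCE A (Python) =====
-- def extract_min_max_frequency_values(language_model_data):
--     """
--     TODO
--     :param language_model_data: a list of tuples of suggestions from the language model service.
--     One tuple consists of: [word_suggestion, frequency_of_word, language_model_level]
--     :return:
--     """
--
--     min_frequencies_per_level = dict()
--     max_frequencies_per_level = dict()
--
--     for word, frequency, level in language_model_data:
--         if level not in min_frequencies_per_level:
--             min_frequencies_per_level[level] = frequency
--         else:
--             min_frequencies_per_level[level] = min(frequency, min_frequencies_per_level[level])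
--
--         if level not in max_frequencies_per_level:
--             max_frequencies_per_level[level] = frequency
--         else:
--             max_frequencies_per_level[level] = max(frequency, max_frequencies_per_level[level])
--
--     return min_frequencies_per_level, max_frequencies_per_level
-- ===== SOURCE B (Python) =====
-- def extract_min_max_frequency_values(language_model_data):
--     """
--     Build-index-then-reduce: one pass groups frequencies per level,
--     a second pass takes min/max of each group.
--     """
--     pairs = [(level, frequency) for _, frequency, level in language_model_data]
--     groups = {}
--     for level, frequency in pairs:
--         groups.setdefault(level, []).append(frequency)
--     min_frequencies_per_level = {level: min(freqs) for level, freqs in groups.items()}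
--     max_frequencies_per_level = {level: max(freqs) for level, freqs in groups.items()}
--     return min_frequencies_per_level, max_frequencies_per_level
-- ===== Notes on version B (the rewrite author's own statement) =====
-- stated objective: alternative
-- what changed: Replaces the running min/max accumulators with a build-index-then-reduce decomposition: one pass groups all frequencies per level into a dict of lists, then the two result dicts are produced by separate reduction passes taking min/max of each group.
import Mathlib
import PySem

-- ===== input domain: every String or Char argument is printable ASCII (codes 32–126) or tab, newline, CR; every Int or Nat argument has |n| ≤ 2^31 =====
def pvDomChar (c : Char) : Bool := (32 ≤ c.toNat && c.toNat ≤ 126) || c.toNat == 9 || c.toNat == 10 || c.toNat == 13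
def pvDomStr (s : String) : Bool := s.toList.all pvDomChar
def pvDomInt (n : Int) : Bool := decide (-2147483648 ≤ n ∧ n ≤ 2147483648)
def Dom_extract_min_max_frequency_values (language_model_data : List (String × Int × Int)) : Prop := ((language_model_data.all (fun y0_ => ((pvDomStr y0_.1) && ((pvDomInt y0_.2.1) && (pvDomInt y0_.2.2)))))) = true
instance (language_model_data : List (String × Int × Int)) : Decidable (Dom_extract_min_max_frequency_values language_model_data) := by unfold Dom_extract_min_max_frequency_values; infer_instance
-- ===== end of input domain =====

-- B replaces A's running min/max accumulators with a build-index-then-reduce decomposition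
-- (group frequencies per level, then reduce each group); same cost, alternative structure.


-- ===== PORT A =====
-- one loop, two dicts: running min / running max per level
def extract_min_max_frequency_values (language_model_data : List (String × Int × Int)) : (List (Int × Int)) × (List (Int × Int)) :=
  let st := language_model_data.foldl
    (fun (st : PySem.Dict Int Int × PySem.Dict Int Int) t =>
      ( match st.1.get? t.2.2 with
        | none => st.1.insert t.2.2 t.2.1
        | some v => st.1.insert t.2.2 (min t.2.1 v),
        match st.2.get? t.2.2 with
        | none => st.2.insert t.2.2 t.2.1
        | some v => st.2.insert t.2.2 (max t.2.1 v) ))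
    (PySem.Dict.empty, PySem.Dict.empty)
  (st.1.items, st.2.items)

-- ===== PORT B =====
-- pvRed op = Python's builtin min/max over a nonempty list (left fold from the head; 0 on [] is unreachable)
def pvRed (op : Int → Int → Int) : List Int → Int
  | [] => 0
  | h :: t => t.foldl op h

def extract_min_max_frequency_values_alt (language_model_data : List (String × Int × Int)) : (List (Int × Int)) × (List (Int × Int)) :=
  let pairs := language_model_data.map (fun t => (t.2.2, t.2.1))
  let groups := pairs.foldl (fun (d : PySem.Dict Int (List Int)) p => d.modify p.1 [] (· ++ [p.2])) PySem.Dict.empty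
  (groups.items.map (fun p => (p.1, pvRed min p.2)),
   groups.items.map (fun p => (p.1, pvRed max p.2)))

-- ===== PRECONDITION & SPEC =====
def Spec_extract_min_max_frequency_values (language_model_data : List (String × Int × Int)) (out : (List (Int × Int)) × (List (Int × Int))) : Prop := out = extract_min_max_frequency_values_alt language_model_data
instance (language_model_data : List (String × Int × Int)) (out : (List (Int × Int)) × (List (Int × Int))) : Decidable (Spec_extract_min_max_frequency_values language_model_data out) := by unfold Spec_extract_min_max_frequency_values; infer_instance

-- ===== CLAIM (what is proved, stated in full; the proofs are below) =====
def Claim_equal_extract_min_max_frequency_values : Prop := ∀ (language_model_data : List (String × Int × Int)), Dom_extract_min_max_frequency_values language_model_data → Spec_extract_min_max_frequency_values language_model_data (extract_min_max_frequency_values language_model_data)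

-- ===== LEMMAS AND PROOFS =====

lemma pvRed_append_singleton (op : Int → Int → Int) (hc : ∀ a b, op a b = op b a)
    (fs : List Int) (f : Int) (h : fs ≠ []) :
    pvRed op (fs ++ [f]) = op f (pvRed op fs) := by
  cases fs with
  | nil => exact absurd rfl h
  | cons x xs => simp [pvRed, List.foldl_append, hc]

lemma foldA_items (op : Int → Int → Int) (hc : ∀ a b, op a b = op b a)
    (data : List (String × Int × Int)) :
    (data.foldl (fun (d : PySem.Dict Int Int) t =>
        match d.get? t.2.2 with
        | none => d.insert t.2.2 t.2.1
        | some v => d.insert t.2.2 (op t.2.1 v)) PySem.Dict.empty).items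
    = (PySem.Set.ofList (data.map (fun t => t.2.2))).map
        (fun k => (k, pvRed op ((data.filter (fun t => t.2.2 == k)).map (fun t => t.2.1)))) := by
  induction data using List.reverseRecOn with
  | nil => rfl
  | append_singleton xs t ih =>
    rw [List.foldl_append]
    simp only [List.foldl_cons, List.foldl_nil]
    set step := (fun (d : PySem.Dict Int Int) (t : String × Int × Int) =>
        match d.get? t.2.2 with
        | none => d.insert t.2.2 t.2.1
        | some v => d.insert t.2.2 (op t.2.1 v)) with hstep
    set D := xs.foldl step PySem.Dict.empty with hD
    set S := PySem.Set.ofList (xs.map (fun t => t.2.2)) with hS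
    have hkeys : D.keys = S := by
      show D.items.map Prod.fst = S
      rw [ih, List.map_map]
      have hid : (Prod.fst ∘ fun k => (k, pvRed op (List.map (fun t => t.2.1) (List.filter (fun t => t.2.2 == k) xs)))) = (id : Int → Int) := rfl
      rw [hid, List.map_id]
    have hnd : D.keys.Nodup := by rw [hkeys]; exact PySem.Set.nodup_ofList _
    simp only [List.map_append, List.map_cons, List.map_nil]
    rw [PySem.Set.ofList_append_singleton, ← hS]
    by_cases hm : t.2.2 ∈ xs.map (fun u => u.2.2)
    · -- level already seen: overwrite in place
      have hmemS : t.2.2 ∈ S := by rw [hS]; exact (PySem.Set.mem_ofList _ _).2 hm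
      have hpair : (t.2.2, pvRed op ((xs.filter (fun u => u.2.2 == t.2.2)).map (fun u => u.2.1))) ∈ D.items := by
        rw [ih]; exact List.mem_map.2 ⟨t.2.2, hmemS, rfl⟩
      have hget : D.get? t.2.2 = some (pvRed op ((xs.filter (fun u => u.2.2 == t.2.2)).map (fun u => u.2.1))) :=
        PySem.Dict.get?_of_mem_items D hpair hnd
      have hcont : D.contains t.2.2 = true := by
        rw [PySem.Dict.contains_eq_isSome_get?, hget]; rfl
      simp only [hget]
      rw [PySem.Dict.items_insert_of_contains D _ hcont, ih]
      rw [PySem.Set.add_of_mem hmemS, List.map_map]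
      apply List.map_congr_left
      intro k hk
      by_cases hkl : k = t.2.2
      · have hne : (xs.filter (fun u => u.2.2 == t.2.2)).map (fun u => u.2.1) ≠ [] := by
          rcases List.mem_map.mp hm with ⟨a, ha, hak⟩
          have hmf : a ∈ xs.filter (fun u => u.2.2 == t.2.2) := by
            rw [List.mem_filter]; exact ⟨ha, by simp [hak]⟩
          intro hnil
          have hmm : a.2.1 ∈ (xs.filter (fun u => u.2.2 == t.2.2)).map (fun u => u.2.1) :=
            List.mem_map.2 ⟨a, hmf, rfl⟩
          rw [hnil] at hmm
          simp at hmm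
        subst hkl
        simp only [Function.comp_apply, beq_self_eq_true, if_true]
        rw [List.filter_append, List.map_append]
        simp only [List.filter_cons, List.filter_nil, beq_self_eq_true, if_true,
          List.map_cons, List.map_nil]
        rw [pvRed_append_singleton op hc _ _ hne]
      · have hbeq : (k == t.2.2) = false := by simp [hkl]
        have hbeq' : (t.2.2 == k) = false := by simp [Ne.symm hkl]
        simp only [Function.comp_apply, hbeq, Bool.false_eq_true, if_false]
        rw [List.filter_append]
        simp only [List.filter_cons, List.filter_nil, hbeq', Bool.false_eq_true, if_false,
          List.append_nil]
    · -- new level: appended at the end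
      have hnmemS : t.2.2 ∉ S := by rw [hS]; exact fun h => hm ((PySem.Set.mem_ofList _ _).1 h)
      have hget : D.get? t.2.2 = none := by
        rw [PySem.Dict.get?_eq_none_iff_not_mem_keys, hkeys]; exact hnmemS
      have hcont : D.contains t.2.2 = false := by
        rw [PySem.Dict.contains_eq_isSome_get?, hget]; rfl
      simp only [hget]
      rw [PySem.Dict.items_insert_of_not_contains D _ hcont, ih]
      rw [PySem.Set.add_of_not_mem hnmemS, List.map_append]
      congr 1
      · apply List.map_congr_left
        intro k hk
        have hkl : k ≠ t.2.2 := fun h => hnmemS (h ▸ hk)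
        have hbeq' : (t.2.2 == k) = false := by simp [Ne.symm hkl]
        rw [List.filter_append]
        simp only [List.filter_cons, List.filter_nil, hbeq', Bool.false_eq_true, if_false,
          List.append_nil]
      · have hfil : xs.filter (fun u => u.2.2 == t.2.2) = [] := by
          rw [List.filter_eq_nil_iff]
          intro a ha hbe
          exact hm (List.mem_map.2 ⟨a, ha, by simpa using hbe⟩)
        simp [List.filter_append, hfil, pvRed]

-- characterisation of B's grouping fold: items are the distinct levels in first-appearance
-- order, each paired with the list of that level's frequencies
lemma groupsB_items (data : List (String × Int × Int)) :
    ((data.map (fun t => (t.2.2, t.2.1))).foldl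
        (fun (d : PySem.Dict Int (List Int)) p => d.modify p.1 [] (· ++ [p.2])) PySem.Dict.empty).items
    = (PySem.Set.ofList (data.map (fun t => t.2.2))).map
        (fun k => (k, (data.filter (fun t => t.2.2 == k)).map (fun t => t.2.1))) := by
  set pairs := data.map (fun t => (t.2.2, t.2.1)) with hpairs
  set G := pairs.foldl (fun (d : PySem.Dict Int (List Int)) p => d.modify p.1 [] (· ++ [p.2])) PySem.Dict.empty with hG
  have hnd : G.keys.Nodup := by
    exact PySem.Dict.nodup_keys_foldl_modify_key pairs Prod.fst [] (fun _ p => (· ++ [p.2]))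
      PySem.Dict.empty List.nodup_nil
  have hkeys : G.keys = PySem.Set.ofList (data.map (fun t => t.2.2)) := by
    rw [hG]
    rw [PySem.Dict.keys_foldl_modify_key pairs Prod.fst [] (fun _ p => (· ++ [p.2]))]
    have : PySem.Dict.keys (PySem.Dict.empty : PySem.Dict Int (List Int)) = [] := rfl
    rw [this, PySem.Set.update_nil_left, hpairs, List.map_map]
    rfl
  have hgetD : ∀ k : Int, G.getD k [] = (data.filter (fun t => t.2.2 == k)).map (fun t => t.2.1) := by
    intro k
    rw [hG, PySem.Dict.getD_foldl_modify_append pairs PySem.Dict.empty k]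
    have h0 : (PySem.Dict.empty : PySem.Dict Int (List Int)).getD k [] = [] := rfl
    rw [h0, List.nil_append, hpairs, List.filter_map, List.map_map]
    rfl
  rw [PySem.Dict.items_eq_map_keys G hnd [], hkeys]
  apply List.map_congr_left
  intro k _
  rw [hgetD k]

-- ===== VERDICT (by name: the statement is the Claim_ definition above) =====
theorem extract_min_max_frequency_values_spec : Claim_equal_extract_min_max_frequency_values := by
  intro data _
  unfold Spec_extract_min_max_frequency_values
  simp only [extract_min_max_frequency_values, extract_min_max_frequency_values_alt]
  rw [PySem.List.foldl_prod_mk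
      (f := fun (d : PySem.Dict Int Int) (t : String × Int × Int) =>
        match d.get? t.2.2 with
        | none => d.insert t.2.2 t.2.1
        | some v => d.insert t.2.2 (min t.2.1 v))
      (g := fun (d : PySem.Dict Int Int) (t : String × Int × Int) =>
        match d.get? t.2.2 with
        | none => d.insert t.2.2 t.2.1
        | some v => d.insert t.2.2 (max t.2.1 v))]
  rw [foldA_items min (fun a b => min_comm a b) data,
      foldA_items max (fun a b => max_comm a b) data,
      groupsB_items data, List.map_map, List.map_map]
  rfl
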